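-- pv_equiv track=rewrite | github.com/Chaithra-28/Python-Codes | hebracket.py | solve
-- ===== SOURCE A (Python) =====
-- def solve(s):
-- 	open=0
-- 	close=0
-- 	res=0
-- 	for i in s:
-- 		if(i=='('):
-- 			open+=1
-- 		else:
-- 			open-=1
--
-- 		if (open<close):
-- 			close=open
-- 			res=0
--
-- 		if (close==open):
-- 			res+=1
--
-- 	if open:
-- 		return 0
-- 	else:
-- 		return res
-- ===== SOURCE B (Python) =====
-- def solve(s):
--     prefixes = []
--     bal = 0
--     for c in s:
--         bal += 1 if c == '(' else -1
--         prefixes.append(bal)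
--     if not prefixes or prefixes[-1] != 0:
--         return 0
--     m = min(prefixes)
--     return prefixes.count(m)
-- ===== Notes on version B (the rewrite author's own statement) =====
-- stated objective: alternative
-- what changed: B builds the full prefix-balance table in one pass and then applies two separate reductions (min, then count) instead of A's incremental running-minimum bookkeeping with reset.
import Mathlib
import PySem

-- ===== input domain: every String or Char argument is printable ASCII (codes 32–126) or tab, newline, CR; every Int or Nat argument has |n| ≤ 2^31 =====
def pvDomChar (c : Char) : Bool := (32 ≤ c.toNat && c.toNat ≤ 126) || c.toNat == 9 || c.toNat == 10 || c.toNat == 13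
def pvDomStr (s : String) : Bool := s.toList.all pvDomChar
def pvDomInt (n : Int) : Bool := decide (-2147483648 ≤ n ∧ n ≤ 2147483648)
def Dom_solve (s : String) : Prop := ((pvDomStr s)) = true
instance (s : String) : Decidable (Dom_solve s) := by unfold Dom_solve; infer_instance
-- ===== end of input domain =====

-- B replaces A's incremental running-minimum-with-reset bookkeeping by an explicit
-- prefix-balance table followed by two separate reductions (min, then count); same cost.

-- ===== PORT A =====
def solveStep (st : Int × Int × Int) (i : Char) : Int × Int × Int :=
  let o := if i = '(' then st.1 + 1 else st.1 - 1
  let c := if o < st.2.1 then o else st.2.1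
  let r := if o < st.2.1 then 0 else st.2.2
  let r := if c = o then r + 1 else r
  (o, c, r)

def solve (s : String) : Int :=
  let st := s.toList.foldl solveStep (0, 0, 0)
  if st.1 ≠ 0 then 0 else st.2.2

-- ===== PORT B =====
def solve_alt (s : String) : Int :=
  let pr := (s.toList.foldl
    (fun (st : Int × List Int) c =>
      let b := st.1 + (if c = '(' then (1 : Int) else -1)
      (b, st.2 ++ [b])) ((0 : Int), ([] : List Int))).2
  if pr = [] then 0
  else if PySem.List.pyGetD pr (-1) 0 ≠ 0 then 0
  else
    match PySem.List.min? pr (fun x => x) with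
    | some m => (pr.count m : Int)
    | none => 0

-- ===== PRECONDITION & SPEC =====
def Spec_solve (s : String) (out : Int) : Prop := out = solve_alt s
instance (s : String) (out : Int) : Decidable (Spec_solve s out) := by unfold Spec_solve; infer_instance

-- ===== CLAIM (what is proved, stated in full; the proofs are below) =====
def Claim_equal_solve : Prop := ∀ (s : String), Dom_solve s → Spec_solve s (solve s)

-- ===== LEMMAS AND PROOFS =====

/-- per-character balance delta -/
def pvDelta (c : Char) : Int := if c = '(' then 1 else -1

/-- running balance after a list of characters, starting at b -/
def pvBal (b : Int) (l : List Char) : Int := l.foldl (fun a c => a + pvDelta c) b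

/-- the prefix-balance table (balances after each character), starting at b -/
def pvPrefs (b : Int) : List Char → List Int
  | [] => []
  | c :: t => (b + pvDelta c) :: pvPrefs (b + pvDelta c) t

lemma pvBal_append (b : Int) (l m : List Char) : pvBal b (l ++ m) = pvBal (pvBal b l) m := by
  simp [pvBal, List.foldl_append]

lemma pvPrefs_append (l : List Char) : ∀ (b : Int) (x : Char),
    pvPrefs b (l ++ [x]) = pvPrefs b l ++ [pvBal b l + pvDelta x] := by
  induction l with
  | nil => intro b x; simp [pvPrefs, pvBal]
  | cons c t ih =>
      intro b x
      simp only [List.cons_append, pvPrefs, ih]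
      simp [pvBal, List.foldl_cons]

lemma foldl_min_le_init (l : List Int) : ∀ (a : Int), l.foldl min a ≤ a := by
  induction l with
  | nil => intro a; simp
  | cons c t ih => intro a; exact le_trans (ih (min a c)) (min_le_left _ _)

lemma foldl_min_le_mem (l : List Int) : ∀ (a x : Int), x ∈ l → l.foldl min a ≤ x := by
  induction l with
  | nil => intro a x hx; cases hx
  | cons c t ih =>
      intro a x hx
      rcases List.mem_cons.mp hx with h | h
      · subst h
        exact le_trans (foldl_min_le_init t (min a x)) (min_le_right _ _)
      · exact ih (min a c) x h

lemma foldl_min_init (l : List Int) : ∀ (a b : Int),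
    l.foldl min (min a b) = min a (l.foldl min b) := by
  induction l with
  | nil => intro a b; simp
  | cons c t ih =>
      intro a b
      simp only [List.foldl_cons, min_assoc]
      exact ih a (min b c)

/-- characterisation of A's loop state after processing l from (0,0,0). -/
lemma solve_loop_char (l : List Char) :
    l.foldl solveStep (0, 0, 0) =
      (pvBal 0 l, (pvPrefs 0 l).foldl min 0,
        ((pvPrefs 0 l).count ((pvPrefs 0 l).foldl min 0) : Int)) := by
  induction l using List.reverseRecOn with
  | nil => simp [pvBal, pvPrefs]
  | append_singleton t x ih =>
      rw [List.foldl_append, ih, pvPrefs_append, pvBal_append]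
      set P := pvPrefs 0 t with hP
      set o := pvBal 0 t with ho
      set c := P.foldl min 0 with hc
      set o' := o + pvDelta x with ho'
      have hstep : solveStep (o, c, (P.count c : Int)) x =
          (o', (if o' < c then o' else c),
            (if (if o' < c then o' else c) = o' then (if o' < c then 0 else (P.count c : Int)) + 1
             else (if o' < c then 0 else (P.count c : Int)))) := by
        simp only [solveStep, pvDelta, ho']
        split <;> rfl
      rw [List.foldl_cons, List.foldl_nil, hstep]
      have hbal : pvBal o [x] = o' := by simp [pvBal, ho']
      rw [hbal]
      have hmin : (P ++ [o']).foldl min 0 = min c o' := by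
        rw [List.foldl_append, hc]; simp
      rw [hmin]
      by_cases h1 : o' < c
      · have hco : min c o' = o' := by omega
        have hnot : o' ∉ P := fun hm => absurd (foldl_min_le_mem P 0 o' hm) (by omega)
        have hcount : (P ++ [o']).count o' = P.count o' + 1 := by
          simp [List.count_append]
        rw [hco]
        simp only [if_pos h1]
        rw [hcount, List.count_eq_zero.mpr hnot]
        simp
      · have hco : min c o' = c := by omega
        rw [hco]
        by_cases h2 : c = o'
        · simp only [if_neg h1, if_pos h2]
          have : List.count c (P ++ [o']) = List.count c P + 1 := by
            rw [List.count_append, h2]; simp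
          rw [this]
          simp
        · simp only [if_neg h1, if_neg h2]
          have : List.count c (P ++ [o']) = List.count c P := by
            rw [List.count_append]
            have : List.count c [o'] = 0 := by
              rw [List.count_eq_zero]; simpa using h2
            omega
          rw [this]

/-- characterisation of B's table-building loop. -/
lemma build_loop_char (l : List Char) : ∀ (b : Int) (acc : List Int),
    l.foldl (fun (st : Int × List Int) c =>
        let v := st.1 + (if c = '(' then (1 : Int) else -1)
        (v, st.2 ++ [v])) (b, acc) = (pvBal b l, acc ++ pvPrefs b l) := by
  induction l with
  | nil => intro b acc; simp [pvBal, pvPrefs]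
  | cons c t ih =>
      intro b acc
      simp only [List.foldl_cons]
      rw [ih]
      simp [pvBal, pvPrefs, pvDelta, List.append_assoc]

-- ===== VERDICT (by name: the statement is the Claim_ definition above) =====
theorem solve_spec : Claim_equal_solve := by
  intro s _
  unfold Spec_solve solve solve_alt
  rw [solve_loop_char, build_loop_char]
  simp only [List.nil_append]
  rcases List.eq_nil_or_concat s.toList with hnil | ⟨t, x, hcons⟩
  · simp [hnil, pvBal, pvPrefs]
  · rw [List.concat_eq_append] at hcons
    rw [hcons, pvPrefs_append, pvBal_append]
    have hbal : pvBal (pvBal 0 t) [x] = pvBal 0 t + pvDelta x := by simp [pvBal]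
    rw [hbal]
    set P := pvPrefs 0 t with hP
    set o' := pvBal 0 t + pvDelta x with ho'
    have hne : P ++ [o'] ≠ [] := by simp
    simp only [if_neg hne]
    rw [PySem.List.pyGetD_neg_one_append_singleton]
    by_cases h0 : o' = 0
    · rw [h0]
      have hA : ¬ ((0 : Int) ≠ 0) := by simp
      rw [if_neg hA, if_neg hA]
      rcases hPP : P ++ [(0 : Int)] with _ | ⟨hd, tl⟩
      · simp at hPP
      · simp only [PySem.List.min?_id_cons]
        have hmle : tl.foldl min hd ≤ 0 := by
          have hmin := PySem.List.min?_isMin (xs := hd :: tl) (key := fun x => x)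
            (m := tl.foldl min hd) (PySem.List.min?_id_cons hd tl)
          have hmem : (0 : Int) ∈ hd :: tl := by rw [← hPP]; simp
          simpa using hmin 0 hmem
        have hfold : List.foldl min 0 (hd :: tl) = tl.foldl min hd := by
          rw [List.foldl_cons, foldl_min_init tl 0 hd]
          omega
        rw [hfold]
    · rw [if_pos h0, if_pos h0]
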